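-- pv_equiv track=rewrite | github.com/AkshdeepSharma/Classroom | Kattis/toiletseat.py | down
-- ===== SOURCE A (Python) =====
-- def down(seat_position):
--     start = seat_position[0]
--     seat_position = seat_position[1:]
--     res = 0
--     for i, val in enumerate(seat_position):
--         if (i == 0 and val == start and start == "U") or (i == 0 and val != start and start == "U"):
--             res += 1
--         elif val == "U":
--             res += 2
--     return res
-- ===== SOURCE B (Python) =====
-- def down(seat_position):
--     start = seat_position[0]
--     if len(seat_position) == 1:
--         return 0
--     c = sum(v == "U" for v in seat_position)
--     if start == "U":
--         return 2 * c - 1 - 2 * (seat_position[1] == "U")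
--     return 2 * c
-- ===== Notes on version B (the rewrite author's own statement) =====
-- stated objective: alternative
-- what changed: Instead of A's enumerate loop over the tail with index-dependent conditionals, B counts 'U' once over the WHOLE list (head included) and turns that global count into the answer by a closed-form arithmetic correction read off the first two elements.
import Mathlib
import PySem

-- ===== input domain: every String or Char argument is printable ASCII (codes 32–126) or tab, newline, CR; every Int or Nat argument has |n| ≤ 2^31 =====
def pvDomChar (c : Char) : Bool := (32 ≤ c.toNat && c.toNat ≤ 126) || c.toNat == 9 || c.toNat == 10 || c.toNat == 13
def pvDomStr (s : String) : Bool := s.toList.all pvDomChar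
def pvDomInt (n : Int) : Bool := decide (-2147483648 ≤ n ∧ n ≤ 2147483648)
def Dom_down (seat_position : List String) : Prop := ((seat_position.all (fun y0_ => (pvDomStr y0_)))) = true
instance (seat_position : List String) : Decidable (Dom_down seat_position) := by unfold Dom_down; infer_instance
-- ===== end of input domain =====

-- B replaces A's indexed loop over the tail by one count of "U" over the whole list plus an
-- arithmetic correction from the first two elements (objective: alternative, same cost).

-- ===== PORT A =====
def down (seat_position : List String) : Int :=
  match PySem.List.pyGet? seat_position 0 with
  | none => 0  -- IndexError in Python; excluded by Pre_down
  | some start =>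
    let rest := PySem.List.slice seat_position (some 1) none
    (PySem.List.enumerate rest).foldl
      (fun res iv =>
        if (iv.1 == 0 && iv.2 == start && start == "U") ||
           (iv.1 == 0 && iv.2 != start && start == "U") then res + 1
        else if iv.2 == "U" then res + 2
        else res) 0

-- ===== PORT B =====
def down_alt (seat_position : List String) : Int :=
  match PySem.List.pyGet? seat_position 0 with
  | none => 0  -- IndexError in Python; excluded by Pre_down
  | some start =>
    if seat_position.length == 1 then 0
    else
      -- sum(v == "U" for v in seat_position)
      let c : Int := seat_position.foldl (fun a v => a + (if v == "U" then 1 else 0)) 0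
      if start == "U" then
        -- seat_position[1] exists: length ≥ 2 in this branch, so pyGet? is exact here
        2 * c - 1 - 2 * (if PySem.List.pyGet? seat_position 1 == some "U" then 1 else 0)
      else 2 * c

-- ===== PRECONDITION & SPEC =====
-- Pre_down excludes only the empty list, on which both Pythons raise IndexError (seat_position[0]).
def Pre_down (seat_position : List String) : Prop := seat_position ≠ []
instance (seat_position : List String) : Decidable (Pre_down seat_position) := by unfold Pre_down; infer_instance
def pvWitness_down : List String := ["U", "D", "U"]
def Spec_down (seat_position : List String) (out : Int) : Prop := out = down_alt seat_position
instance (seat_position : List String) (out : Int) : Decidable (Spec_down seat_position out) := by unfold Spec_down; infer_instance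

-- ===== CLAIM (what is proved, stated in full; the proofs are below) =====
def Claim_equal_down : Prop := ∀ (seat_position : List String), Dom_down seat_position → Pre_down seat_position → Spec_down seat_position (down seat_position)

-- ===== LEMMAS AND PROOFS =====

-- A's loop body after the first element: indices are ≥ 1, so it just adds 2 per "U".
theorem down_tail_fold (u : List String) (st : String) (s : Int) (acc : Int) (hs : 1 ≤ s) :
    (PySem.List.enumerate u s).foldl
      (fun res iv =>
        if (iv.1 = 0 ∧ iv.2 = st) ∧ st = "U" ∨ (iv.1 = 0 ∧ ¬iv.2 = st) ∧ st = "U" then res + 1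
        else if iv.2 = "U" then res + 2
        else res) acc = acc + 2 * (u.count "U" : Int) := by
  induction u generalizing s acc with
  | nil => simp [PySem.List.enumerate_nil]
  | cons v u ih =>
    rw [PySem.List.enumerate_cons]
    simp only [List.foldl_cons]
    have h0 : ¬ (s = 0) := by omega
    rw [ih (s + 1) _ (by omega)]
    by_cases hv : v = "U" <;> simp [hv, h0] <;> ring

-- B's counting fold is the list count.
theorem down_count_fold (u : List String) (acc : Int) :
    u.foldl (fun a v => a + (if v = "U" then (1:Int) else 0)) acc = acc + (u.count "U" : Int) := by
  induction u generalizing acc with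
  | nil => simp
  | cons v u ih =>
    simp only [List.foldl_cons, ih]
    by_cases hv : v = "U" <;> simp [hv, List.count_cons] <;> ring

-- ===== VERDICT (by name: the statement is the Claim_ definition above) =====
theorem down_spec : Claim_equal_down := by
  intro sp _ hpre
  unfold Spec_down down down_alt
  match sp with
  | [] => exact absurd rfl hpre
  | s :: t =>
    simp only [PySem.List.pyGet?, PySem.List.pyIdx?]
    norm_num
    match t with
    | [] => simp [PySem.List.slice_from_one, PySem.List.enumerate_nil]
    | v :: u =>
      rw [PySem.List.slice_from_one]
      simp only [List.tail_cons, PySem.List.enumerate_cons, List.foldl_cons, down_count_fold]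
      rw [down_tail_fold u s (0 + 1) _ (by omega)]
      have hlen : ¬ ((s :: v :: u).length = 1) := by simp
      by_cases hs : s = "U" <;> by_cases hv : v = "U" <;>
        simp [hs, hv, hlen, down_count_fold] <;> ring
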